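-- pv_equiv track=rewrite | github.com/saro0307/Tavern-cut | Script.py | run_turing_machine
-- ===== SOURCE A (Python) =====
-- states = {
--     "q0": {  # Start state
--         "r": ("q1", "r", "R"),  # If the current symbol is "r", move right to state q1 and write "r"
--     },
--     "q1": {
--         "u": ("q2", "u", "R"),  # If the current symbol is "u", move right to state q2 and write "u"
--     },
--     "q2": {
--         "s": ("q3", "s", "R"),  # If the current symbol is "s", move right to state q3 and write "s"
--     },
--     "q3": {
--         "s": ("accept", "s", "S"),  # If the current symbol is "s", move to the accept state and write "s"
--     },
--     "q4": {
--         "i": ("accept", "i", "S"),  # If the current symbol is "i", move to the accept state and write "i"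
--     },
--     "q5": {
--         "a": ("accept", "a", "S"),  # If the current symbol is "a", move to the accept state and write "a"
--     },
-- }
--
-- def run_turing_machine(password):
--     tape = list(password)
--     current_state = "q0"
--     current_position = 0
--     incorrect_flag = False
--
--     while current_state != "accept":
--         current_symbol = tape[current_position]
--         if current_symbol in states[current_state]:
--             new_state, write_symbol, move_direction = states[current_state][current_symbol]
--             tape[current_position] = write_symbol
--             if move_direction == "R":
--                 current_position += 1
--             elif move_direction == "L":
--                 current_position -= 1
--             current_state = new_state
--         else:
--             incorrect_flag = True
--             break
--
--     if incorrect_flag: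
--         return False
--     else:
--         return True
-- ===== SOURCE B (Python) =====
-- def run_turing_machine(password):
--     tape = list(password)
--     for i, expected in enumerate("russ"):
--         if tape[i] != expected:
--             return False
--     return True
-- ===== Notes on version B (the rewrite author's own statement) =====
-- stated objective: simpler
-- what changed: Replaced the state-transition table and Turing-machine simulation loop with a direct indexed prefix check against the literal "russ" (reading tape[i] so proper prefixes still raise IndexError as in A).
import Mathlib
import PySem

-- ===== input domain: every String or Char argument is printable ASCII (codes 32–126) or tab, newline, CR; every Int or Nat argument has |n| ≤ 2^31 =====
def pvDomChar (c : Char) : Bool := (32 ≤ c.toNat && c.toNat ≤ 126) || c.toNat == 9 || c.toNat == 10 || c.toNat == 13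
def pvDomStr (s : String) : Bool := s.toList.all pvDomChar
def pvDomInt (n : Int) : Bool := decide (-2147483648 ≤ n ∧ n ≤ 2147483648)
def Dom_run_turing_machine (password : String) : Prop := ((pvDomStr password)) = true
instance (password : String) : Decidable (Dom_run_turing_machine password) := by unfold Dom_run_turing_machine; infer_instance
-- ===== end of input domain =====

-- B replaces A's state-transition table and Turing-machine loop with a direct indexed
-- prefix check against "russ" (simpler; same values on Pre_, which excludes the inputs
-- where A raises IndexError). A mutates only its local tape copy, nothing caller-visible.


-- ===== PORT A =====
-- the module-level `states` dict, as nested PySem dicts (insertion order)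
def statesA : PySem.Dict String (PySem.Dict Char (String × Char × String)) :=
  PySem.Dict.ofList
  [ ("q0", PySem.Dict.ofList [('r', ("q1", 'r', "R"))])
  , ("q1", PySem.Dict.ofList [('u', ("q2", 'u', "R"))])
  , ("q2", PySem.Dict.ofList [('s', ("q3", 's', "R"))])
  , ("q3", PySem.Dict.ofList [('s', ("accept", 's', "S"))])
  , ("q4", PySem.Dict.ofList [('i', ("accept", 'i', "S"))])
  , ("q5", PySem.Dict.ofList [('a', ("accept", 'a', "S"))]) ]

-- the while loop; `none` = the Python raises (tape[pos] IndexError / states[st] KeyError /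
-- fuel out). Within Pre_ the loop takes at most 5 iterations (q0→q1→q2→q3→accept), so
-- fuel 8 never runs out and the recursion is exact.
def loopA : Nat → List Char → String → Int → Option Bool
  | 0, _, _, _ => none
  | f + 1, tape, st, pos =>
    if st ≠ "accept" then
      match PySem.List.pyGet? tape pos with
      | none => none                           -- tape[current_position] : IndexError
      | some sym =>
        match PySem.Dict.get? statesA st with
        | none => none                         -- states[current_state] : KeyError
        | some inner =>
          if (PySem.Dict.get? inner sym).isSome then   -- current_symbol in states[...]
            match PySem.Dict.get? inner sym with
            | none => none
            | some (ns, ws, dir) =>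
              let tape' := PySem.List.pySetD tape pos ws   -- tape[pos] = ws (pos ≥ 0, in range here)
              let pos' := if dir = "R" then pos + 1 else if dir = "L" then pos - 1 else pos
              loopA f tape' ns pos'
          else some false                      -- incorrect_flag = True; break → return False
    else some true                             -- loop exits in accept → return True

def run_turing_machine (password : String) : Bool :=
  (loopA 8 password.toList "q0" 0).getD false

-- ===== PORT B =====
-- for i, expected in enumerate("russ"): if tape[i] != expected: return False / return True
def loopB (tape : List Char) : List (Int × Char) → Option Bool
  | [] => some true
  | (i, expected) :: rest =>
    match PySem.List.pyGet? tape i with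
    | none => none                             -- tape[i] : IndexError
    | some c => if c ≠ expected then some false else loopB tape rest

def run_turing_machine_alt (password : String) : Bool :=
  (loopB password.toList (PySem.List.enumerate "russ".toList)).getD false

-- ===== PRECONDITION & SPEC =====
-- Pre_ excludes exactly the inputs on which the Python A raises IndexError: the proper
-- prefixes of "russ" ("", "r", "ru", "rus"), where the head runs off the tape before accept.
def Pre_run_turing_machine (password : String) : Prop :=
  ¬ (password.toList.length < 4 ∧ password.toList <+: ['r', 'u', 's', 's'])
instance (password : String) : Decidable (Pre_run_turing_machine password) := by
  unfold Pre_run_turing_machine; infer_instance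
def pvWitness_run_turing_machine : String := "russ"

def Spec_run_turing_machine (password : String) (out : Bool) : Prop := out = run_turing_machine_alt password
instance (password : String) (out : Bool) : Decidable (Spec_run_turing_machine password out) := by unfold Spec_run_turing_machine; infer_instance

-- ===== CLAIM (what is proved, stated in full; the proofs are below) =====
def Claim_equal_run_turing_machine : Prop := ∀ (password : String), Dom_run_turing_machine password → Pre_run_turing_machine password → Spec_run_turing_machine password (run_turing_machine password)

-- ===== LEMMAS AND PROOFS =====

-- index/write evaluation on cons lists at the numeral positions 1, 2, 3
theorem get1 (x a : Char) (t : List Char) : PySem.List.pyGet? (x :: a :: t) 1 = some a := by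
  rw [show (1 : Int) = ((0 : Nat) : Int) + 1 from rfl, PySem.List.pyGet?_cons_succ]; simp

theorem get2 (x y a : Char) (t : List Char) : PySem.List.pyGet? (x :: y :: a :: t) 2 = some a := by
  rw [show (2 : Int) = ((1 : Nat) : Int) + 1 from rfl, PySem.List.pyGet?_cons_succ,
    show ((1 : Nat) : Int) = ((0 : Nat) : Int) + 1 from rfl, PySem.List.pyGet?_cons_succ]; simp

theorem get3 (x y z a : Char) (t : List Char) :
    PySem.List.pyGet? (x :: y :: z :: a :: t) 3 = some a := by
  rw [show (3 : Int) = ((2 : Nat) : Int) + 1 from rfl, PySem.List.pyGet?_cons_succ,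
    show ((2 : Nat) : Int) = ((1 : Nat) : Int) + 1 from rfl, PySem.List.pyGet?_cons_succ,
    show ((1 : Nat) : Int) = ((0 : Nat) : Int) + 1 from rfl, PySem.List.pyGet?_cons_succ]; simp

-- the machine always writes back the symbol it just read, so the tape is unchanged
theorem set0 (a : Char) (t : List Char) : PySem.List.pySetD (a :: t) 0 a = a :: t := by
  simp [PySem.List.pySetD, PySem.List.pySet?, PySem.List.pyIdx?] <;> split_ifs <;> rfl

theorem set1 (x a : Char) (t : List Char) :
    PySem.List.pySetD (x :: a :: t) 1 a = x :: a :: t := by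
  simp [PySem.List.pySetD, PySem.List.pySet?, PySem.List.pyIdx?] <;> split_ifs <;> rfl

theorem set2 (x y a : Char) (t : List Char) :
    PySem.List.pySetD (x :: y :: a :: t) 2 a = x :: y :: a :: t := by
  simp [PySem.List.pySetD, PySem.List.pySet?, PySem.List.pyIdx?] <;> split_ifs <;> rfl

theorem set3 (x y z a : Char) (t : List Char) :
    PySem.List.pySetD (x :: y :: z :: a :: t) 3 a = x :: y :: z :: a :: t := by
  simp [PySem.List.pySetD, PySem.List.pySet?, PySem.List.pyIdx?] <;> split_ifs <;> rfl

-- the rows of `states` that the loop can reach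
theorem lk0 : PySem.Dict.get? statesA "q0" = some (PySem.Dict.mk [('r', ("q1", 'r', "R"))]) := by rfl
theorem lk1 : PySem.Dict.get? statesA "q1" = some (PySem.Dict.mk [('u', ("q2", 'u', "R"))]) := by rfl
theorem lk2 : PySem.Dict.get? statesA "q2" = some (PySem.Dict.mk [('s', ("q3", 's', "R"))]) := by rfl
theorem lk3 : PySem.Dict.get? statesA "q3" = some (PySem.Dict.mk [('s', ("accept", 's', "S"))]) := by rfl

-- one-step evaluation of A's loop in each reachable configuration
theorem loopA_accept (f : Nat) (tape : List Char) (pos : Int) :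
    loopA (f + 1) tape "accept" pos = some true := by
  rw [loopA]; simp

theorem loopA_q0_r (f : Nat) (t : List Char) :
    loopA (f + 1) ('r' :: t) "q0" 0 = loopA f ('r' :: t) "q1" 1 := by
  rw [loopA, PySem.List.pyGet?_zero_cons, lk0]
  simp only [PySem.Dict.get?_mk_cons]
  simp [set0]

theorem loopA_q0_no (f : Nat) (a : Char) (t : List Char) (ha : a ≠ 'r') :
    loopA (f + 1) (a :: t) "q0" 0 = some false := by
  rw [loopA, PySem.List.pyGet?_zero_cons, lk0]
  simp only [PySem.Dict.get?_mk_cons]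
  simp [Ne.symm ha, PySem.Dict.get?]

theorem loopA_q1_u (f : Nat) (x : Char) (t : List Char) :
    loopA (f + 1) (x :: 'u' :: t) "q1" 1 = loopA f (x :: 'u' :: t) "q2" 2 := by
  rw [loopA, get1, lk1]
  simp only [PySem.Dict.get?_mk_cons]
  simp [set1]

theorem loopA_q1_no (f : Nat) (x a : Char) (t : List Char) (ha : a ≠ 'u') :
    loopA (f + 1) (x :: a :: t) "q1" 1 = some false := by
  rw [loopA, get1, lk1]
  simp only [PySem.Dict.get?_mk_cons]
  simp [Ne.symm ha, PySem.Dict.get?]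

theorem loopA_q2_s (f : Nat) (x y : Char) (t : List Char) :
    loopA (f + 1) (x :: y :: 's' :: t) "q2" 2 = loopA f (x :: y :: 's' :: t) "q3" 3 := by
  rw [loopA, get2, lk2]
  simp only [PySem.Dict.get?_mk_cons]
  simp [set2]

theorem loopA_q2_no (f : Nat) (x y a : Char) (t : List Char) (ha : a ≠ 's') :
    loopA (f + 1) (x :: y :: a :: t) "q2" 2 = some false := by
  rw [loopA, get2, lk2]
  simp only [PySem.Dict.get?_mk_cons]
  simp [Ne.symm ha, PySem.Dict.get?]

theorem loopA_q3_s (f : Nat) (x y z : Char) (t : List Char) :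
    loopA (f + 1) (x :: y :: z :: 's' :: t) "q3" 3 = loopA f (x :: y :: z :: 's' :: t) "accept" 3 := by
  rw [loopA, get3, lk3]
  simp only [PySem.Dict.get?_mk_cons]
  simp [set3]

theorem loopA_q3_no (f : Nat) (x y z a : Char) (t : List Char) (ha : a ≠ 's') :
    loopA (f + 1) (x :: y :: z :: a :: t) "q3" 3 = some false := by
  rw [loopA, get3, lk3]
  simp only [PySem.Dict.get?_mk_cons]
  simp [Ne.symm ha, PySem.Dict.get?]

theorem enum_russ :
    PySem.List.enumerate "russ".toList = [(0, 'r'), (1, 'u'), (2, 's'), (3, 's')] := by rfl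

-- the loops agree on every list that is not a proper prefix of "russ"
theorem both_eq (l : List Char)
    (h : ¬ (l.length < 4 ∧ l <+: ['r', 'u', 's', 's'])) :
    (loopA 8 l "q0" 0).getD false = (loopB l (PySem.List.enumerate "russ".toList)).getD false := by
  rw [enum_russ]
  match l with
  | [] => exact absurd ⟨by simp, ⟨['r', 'u', 's', 's'], rfl⟩⟩ h
  | [a] =>
    by_cases ha : a = 'r'
    · subst ha; exact absurd ⟨by simp, ⟨['u', 's', 's'], rfl⟩⟩ h
    · rw [show (8 : Nat) = 7 + 1 from rfl, loopA_q0_no 7 a [] ha]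
      simp [loopB, PySem.List.pyGet?_zero_cons, ha]
  | [a, b] =>
    by_cases ha : a = 'r'
    · by_cases hb : b = 'u'
      · subst ha hb; exact absurd ⟨by simp, ⟨['s', 's'], rfl⟩⟩ h
      · subst ha
        rw [show (8 : Nat) = 6 + 1 + 1 from rfl, loopA_q0_r, loopA_q1_no 6 'r' b [] hb]
        simp [loopB, PySem.List.pyGet?_zero_cons, get1, hb]
    · rw [show (8 : Nat) = 7 + 1 from rfl, loopA_q0_no 7 a [b] ha]
      simp [loopB, PySem.List.pyGet?_zero_cons, ha]
  | [a, b, c] =>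
    by_cases ha : a = 'r'
    · by_cases hb : b = 'u'
      · by_cases hc : c = 's'
        · subst ha hb hc; exact absurd ⟨by simp, ⟨['s'], rfl⟩⟩ h
        · subst ha hb
          rw [show (8 : Nat) = 5 + 1 + 1 + 1 from rfl, loopA_q0_r, loopA_q1_u,
            loopA_q2_no 5 'r' 'u' c [] hc]
          simp [loopB, PySem.List.pyGet?_zero_cons, get1, get2, hc]
      · subst ha
        rw [show (8 : Nat) = 6 + 1 + 1 from rfl, loopA_q0_r, loopA_q1_no 6 'r' b [c] hb]
        simp [loopB, PySem.List.pyGet?_zero_cons, get1, hb]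
    · rw [show (8 : Nat) = 7 + 1 from rfl, loopA_q0_no 7 a [b, c] ha]
      simp [loopB, PySem.List.pyGet?_zero_cons, ha]
  | a :: b :: c :: d :: rest =>
    by_cases ha : a = 'r'
    · by_cases hb : b = 'u'
      · by_cases hc : c = 's'
        · by_cases hd : d = 's'
          · subst ha hb hc hd
            rw [show (8 : Nat) = 3 + 1 + 1 + 1 + 1 + 1 from rfl, loopA_q0_r, loopA_q1_u,
              loopA_q2_s, loopA_q3_s, loopA_accept]
            simp [loopB, PySem.List.pyGet?_zero_cons, get1, get2, get3]
          · subst ha hb hc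
            rw [show (8 : Nat) = 4 + 1 + 1 + 1 + 1 from rfl, loopA_q0_r, loopA_q1_u,
              loopA_q2_s, loopA_q3_no 4 'r' 'u' 's' d rest hd]
            simp [loopB, PySem.List.pyGet?_zero_cons, get1, get2, get3, hd]
        · subst ha hb
          rw [show (8 : Nat) = 5 + 1 + 1 + 1 from rfl, loopA_q0_r, loopA_q1_u,
            loopA_q2_no 5 'r' 'u' c (d :: rest) hc]
          simp [loopB, PySem.List.pyGet?_zero_cons, get1, get2, hc]
      · subst ha
        rw [show (8 : Nat) = 6 + 1 + 1 from rfl, loopA_q0_r, loopA_q1_no 6 'r' b (c :: d :: rest) hb]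
        simp [loopB, PySem.List.pyGet?_zero_cons, get1, hb]
    · rw [show (8 : Nat) = 7 + 1 from rfl, loopA_q0_no 7 a (b :: c :: d :: rest) ha]
      simp [loopB, PySem.List.pyGet?_zero_cons, ha]

-- ===== VERDICT (by name: the statement is the Claim_ definition above) =====
theorem run_turing_machine_spec : Claim_equal_run_turing_machine := by
  intro password _ hpre
  unfold Spec_run_turing_machine run_turing_machine run_turing_machine_alt
  exact both_eq password.toList hpre
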